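-- pv_equiv track=rewrite | github.com/chenjiasheng/leetcode_practice | users/chenjiasheng/20210122.py | get_self_insert_gain_table
-- ===== SOURCE A (Python) =====
-- def get_self_insert_gain_table(digit):
--     n = len(digit)
--     gains = [(n, '0')] * n
--
--     for i in range(1, n):
--         for j in range(i, n):
--             if digit[j - i] < digit[j]:
--                 break
--             if digit[j - i] > digit[j]:
--                 gains[i] = (j, digit[j - i])
--                 break
--     return gains
-- ===== SOURCE B (Python) =====
-- def get_self_insert_gain_table(digit):
--     n = len(digit)
--     z = [0] * n
--     l = r = 0
--     for i in range(1, n):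
--         k = min(r - i, z[i - l]) if i < r else 0
--         while i + k < n and digit[k] == digit[i + k]:
--             k += 1
--         z[i] = k
--         if r < i + k:
--             l, r = i, i + k
--     gains = [(n, '0')] * n
--     for i in range(1, n):
--         j = i + z[i]
--         if j < n and digit[j - i] > digit[j]:
--             gains[i] = (j, digit[j - i])
--     return gains
-- ===== Notes on version B (the rewrite author's own statement) =====
-- stated objective: faster
-- what changed: Replaces A's per-shift rescan of the string (nested loops, quadratic in the worst case) by a single linear-time Z-array computation; the first mismatch for shift i is read off as i + z[i] and compared once.
import Mathlib
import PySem

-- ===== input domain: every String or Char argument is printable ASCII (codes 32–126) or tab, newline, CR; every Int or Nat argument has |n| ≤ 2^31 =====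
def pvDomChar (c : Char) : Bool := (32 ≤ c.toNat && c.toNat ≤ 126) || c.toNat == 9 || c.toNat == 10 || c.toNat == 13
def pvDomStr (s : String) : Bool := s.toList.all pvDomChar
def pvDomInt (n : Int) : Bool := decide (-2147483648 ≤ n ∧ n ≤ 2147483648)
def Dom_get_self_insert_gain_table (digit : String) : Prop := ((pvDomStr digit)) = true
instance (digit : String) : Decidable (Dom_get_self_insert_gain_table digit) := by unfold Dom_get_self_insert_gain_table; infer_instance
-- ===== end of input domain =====

-- B replaces A's quadratic per-shift rescans by a Z-array (longest common prefix of digit and each suffix)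
-- computed once in linear time; the first mismatch for shift i is i + z[i]. Objective: faster (asymptotic).

-- ===== PORT A =====
-- inner `for j in range(i, n)` loop of A, with its two `break`s; returns the entry written to gains[i], if any
def pvInnerA (s : List Char) (n i j : Nat) : Option (Int × String) :=
  if _h : j < n then
    if s.getD (j - i) ' ' < s.getD j ' ' then none
    else if s.getD j ' ' < s.getD (j - i) ' ' then some ((j : Int), String.ofList [s.getD (j - i) ' '])
    else pvInnerA s n i (j + 1)
  else none
termination_by n - j

def get_self_insert_gain_table (digit : String) : List (Int × String) :=
  let s := digit.toList
  let n := s.length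
  (List.range' 1 (n - 1)).foldl
    (fun g i => match pvInnerA s n i i with
      | some v => g.set i v
      | none => g)
    (List.replicate n ((n : Int), "0"))

-- ===== PORT B =====
-- the `while i + k < n and digit[k] == digit[i + k]: k += 1` loop of B
def pvWhileK (s : List Char) (n i k : Nat) : Nat :=
  if _h : i + k < n ∧ s.getD k ' ' = s.getD (i + k) ' ' then pvWhileK s n i (k + 1) else k
termination_by n - (i + k)

-- one iteration of B's Z-array loop; state = (z, l, r)
def pvZStep (s : List Char) (n : Nat) (st : List Nat × Nat × Nat) (i : Nat) : List Nat × Nat × Nat :=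
  let k0 := if i < st.2.2 then min (st.2.2 - i) (st.1.getD (i - st.2.1) 0) else 0
  let k := pvWhileK s n i k0
  let z' := st.1.set i k
  if st.2.2 < i + k then (z', i, i + k) else (z', st.2.1, st.2.2)

def get_self_insert_gain_table_alt (digit : String) : List (Int × String) :=
  let s := digit.toList
  let n := s.length
  let z := ((List.range' 1 (n - 1)).foldl (pvZStep s n) (List.replicate n 0, 0, 0)).1
  (List.range' 1 (n - 1)).foldl
    (fun g i =>
      let j := i + z.getD i 0
      if j < n ∧ s.getD j ' ' < s.getD (j - i) ' ' then
        g.set i ((j : Int), String.ofList [s.getD (j - i) ' '])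
      else g)
    (List.replicate n ((n : Int), "0"))

-- ===== PRECONDITION & SPEC =====
def Spec_get_self_insert_gain_table (digit : String) (out : List (Int × String)) : Prop := out = get_self_insert_gain_table_alt digit
instance (digit : String) (out : List (Int × String)) : Decidable (Spec_get_self_insert_gain_table digit out) := by unfold Spec_get_self_insert_gain_table; infer_instance

-- ===== CLAIM (what is proved, stated in full; the proofs are below) =====
def Claim_equal_get_self_insert_gain_table : Prop := ∀ (digit : String), Dom_get_self_insert_gain_table digit → Spec_get_self_insert_gain_table digit (get_self_insert_gain_table digit)

-- ===== LEMMAS AND PROOFS =====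

-- longest common prefix length of two lists
def pvLcp : List Char → List Char → Nat
  | a :: x, b :: y => if a = b then pvLcp x y + 1 else 0
  | _, _ => 0

theorem pvLcp_nil_right (x : List Char) : pvLcp x [] = 0 := by cases x <;> rfl

theorem pvLcp_le_right (x y : List Char) : pvLcp x y ≤ y.length := by
  induction x generalizing y with
  | nil => simp [pvLcp]
  | cons a x ih =>
    cases y with
    | nil => simp [pvLcp]
    | cons b y => simp only [pvLcp]; split <;> simp [ih y]

theorem pvLcp_get (x y : List Char) (j : Nat) (hj : j < pvLcp x y) (d : Char) :
    x.getD j d = y.getD j d := by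
  induction x generalizing y j with
  | nil => simp [pvLcp] at hj
  | cons a x ih =>
    cases y with
    | nil => simp [pvLcp] at hj
    | cons b y =>
      simp only [pvLcp] at hj
      split at hj
      · cases j with
        | zero => simpa using ‹a = b›
        | succ j => simpa using ih y j (by omega) 
      · omega

theorem le_pvLcp (x y : List Char) (k : Nat) (hx : k ≤ x.length) (hy : k ≤ y.length)
    (h : ∀ j < k, x.getD j ' ' = y.getD j ' ') : k ≤ pvLcp x y := by
  induction x generalizing y k with
  | nil => simp at hx; omega
  | cons a x ih =>
    cases y with
    | nil => simp at hy; omega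
    | cons b y =>
      cases k with
      | zero => omega
      | succ k =>
        have hab : a = b := by simpa using h 0 (by omega)
        simp only [pvLcp, if_pos hab]
        have := ih y k (by simpa using hx) (by simpa using hy)
          (fun j hj => by simpa using h (j + 1) (by omega))
        omega

theorem pvGetD_drop (s : List Char) (i j : Nat) (d : Char) :
    (s.drop i).getD j d = s.getD (i + j) d := by
  simp [List.getD_eq_getElem?_getD, List.getElem?_drop]

-- L s i = length of the common prefix of s and its i-th suffix
def pvL (s : List Char) (i : Nat) : Nat := pvLcp s (s.drop i)

theorem pvL_le (s : List Char) (i : Nat) : pvL s i ≤ s.length - i := by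
  simpa [pvL] using pvLcp_le_right s (s.drop i)

theorem pvL_match (s : List Char) (i j : Nat) (hj : j < pvL s i) :
    s.getD j ' ' = s.getD (i + j) ' ' := by
  have := pvLcp_get s (s.drop i) j hj ' '
  rwa [pvGetD_drop] at this

theorem le_pvL (s : List Char) (i k : Nat) (hk : k ≤ s.length - i)
    (h : ∀ j < k, s.getD j ' ' = s.getD (i + j) ' ') : k ≤ pvL s i := by
  refine le_pvLcp s (s.drop i) k (by omega) (by simpa using hk) ?_
  intro j hj
  rw [pvGetD_drop]; exact h j hj

-- the Option value A's inner loop at shift i produces, characterised by pvL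
def pvGain (s : List Char) (i : Nat) : Option (Int × String) :=
  let j := i + pvL s i
  if j < s.length ∧ s.getD j ' ' < s.getD (j - i) ' ' then
    some ((j : Int), String.ofList [s.getD (j - i) ' '])
  else none

theorem pvInnerA_eq_aux (s : List Char) (i : Nat) :
    ∀ c j, i ≤ j → s.length - j ≤ c →
    pvInnerA s s.length i j =
      (let m := pvLcp (s.drop (j - i)) (s.drop j)
       if j + m < s.length ∧ s.getD (j + m) ' ' < s.getD (j - i + m) ' ' then
         some (((j + m : Nat) : Int), String.ofList [s.getD (j - i + m) ' '])
       else none) := by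
  intro c
  induction c with
  | zero =>
    intro j hij hc
    have hj : s.length ≤ j := by omega
    rw [pvInnerA, dif_neg (by omega)]
    have : s.drop j = [] := List.drop_eq_nil_of_le hj
    simp [this, pvLcp_nil_right]
    omega
  | succ c ih =>
    intro j hij hc
    by_cases hj : j < s.length
    · have hji : j - i < s.length := by omega
      have hd1 : s.drop (j - i) = s.getD (j - i) ' ' :: s.drop (j - i + 1) := by
        rw [List.getD_eq_getElem s ' ' hji]
        exact List.drop_eq_getElem_cons hji
      have hd2 : s.drop j = s.getD j ' ' :: s.drop (j + 1) := by
        rw [List.getD_eq_getElem s ' ' hj]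
        exact List.drop_eq_getElem_cons hj
      rw [pvInnerA, dif_pos hj]
      by_cases h1 : s.getD (j - i) ' ' < s.getD j ' '
      · rw [if_pos h1, hd1, hd2]
        simp only [pvLcp, if_neg (ne_of_lt h1)]
        simp only [Nat.add_zero]
        rw [if_neg]
        rintro ⟨-, hlt⟩
        exact absurd hlt (not_lt.mpr (le_of_lt h1))
      · rw [if_neg h1]
        by_cases h2 : s.getD j ' ' < s.getD (j - i) ' '
        · rw [if_pos h2, hd1, hd2]
          simp only [pvLcp, if_neg (Ne.symm (ne_of_lt h2))]
          simp only [Nat.add_zero]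
          rw [if_pos ⟨hj, h2⟩]
        · -- equal characters: recurse
          have heq : s.getD (j - i) ' ' = s.getD j ' ' := le_antisymm (not_lt.mp h2) (not_lt.mp h1)
          rw [if_neg h2]
          rw [ih (j + 1) (by omega) (by omega)]
          rw [hd1, hd2]
          simp only [pvLcp, if_pos heq]
          have h3 : j + 1 - i = j - i + 1 := by omega
          rw [h3]
          set m := pvLcp (s.drop (j - i + 1)) (s.drop (j + 1)) with hm
          have e1 : j + (m + 1) = j + 1 + m := by omega
          have e2 : j - i + (m + 1) = j - i + 1 + m := by omega
          rw [e1, e2]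
    · rw [pvInnerA, dif_neg hj]
      have : s.drop j = [] := List.drop_eq_nil_of_le (by omega)
      simp [this, pvLcp_nil_right]
      omega

theorem pvInnerA_eq (s : List Char) (i : Nat) :
    pvInnerA s s.length i i = pvGain s i := by
  have := pvInnerA_eq_aux s i (s.length) i (le_refl i) (by omega)
  rw [this]
  simp only [Nat.sub_self, List.drop_zero, pvGain, pvL]
  simp

-- B's while loop computes pvL, given a valid starting point
theorem pvWhileK_eq (s : List Char) (i : Nat) :
    ∀ c k, s.length - (i + k) ≤ c → k ≤ s.length - i →
    (∀ j < k, s.getD j ' ' = s.getD (i + j) ' ') →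
    pvWhileK s s.length i k = pvL s i := by
  intro c
  induction c with
  | zero =>
    intro k hc hk h
    have hik : s.length ≤ i + k := by omega
    rw [pvWhileK, dif_neg (by omega)]
    have h1 : k ≤ pvL s i := le_pvL s i k hk h
    have h2 : pvL s i ≤ s.length - i := pvL_le s i
    omega
  | succ c ih =>
    intro k hc hk h
    by_cases hcond : i + k < s.length ∧ s.getD k ' ' = s.getD (i + k) ' '
    · rw [pvWhileK, dif_pos hcond]
      refine ih (k + 1) (by omega) (by omega) ?_
      intro j hj
      rcases Nat.lt_succ_iff_lt_or_eq.mp hj with hj' | hj'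
      · exact h j hj'
      · subst hj'; exact hcond.2
    · rw [pvWhileK, dif_neg hcond]
      have h1 : k ≤ pvL s i := le_pvL s i k hk h
      have h2 : pvL s i ≤ s.length - i := pvL_le s i
      by_contra hne
      have hkL : k < pvL s i := by omega
      have hik : i + k < s.length := by omega
      have := pvL_match s i k hkL
      exact hcond ⟨hik, this⟩

-- invariant of B's Z loop: z is correct below i and (l, r) is a matching window
def pvInv (s : List Char) (st : List Nat × Nat × Nat) (i : Nat) : Prop :=
  st.1.length = s.length ∧
  (∀ m, 1 ≤ m → m < i → st.1.getD m 0 = pvL s m) ∧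
  st.2.1 ≤ st.2.2 ∧ st.2.2 ≤ s.length ∧
  (∀ j < st.2.2 - st.2.1, s.getD j ' ' = s.getD (st.2.1 + j) ' ') ∧
  (st.2.2 ≤ i ∨ (1 ≤ st.2.1 ∧ st.2.1 < i))

theorem pvZStep_inv (s : List Char) (st : List Nat × Nat × Nat) (i : Nat)
    (hi1 : 1 ≤ i) (hin : i < s.length) (hInv : pvInv s st i) :
    pvInv s (pvZStep s s.length st i) (i + 1) := by
  obtain ⟨hlen, hz, hlr, hrn, hwin, hpos⟩ := hInv
  obtain ⟨z, l, r⟩ := st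
  simp only [pvInv] at *
  set k0 := if i < r then min (r - i) (z.getD (i - l) 0) else 0 with hk0
  have hk0le : k0 ≤ s.length - i := by
    rw [hk0]; split
    · omega
    · omega
  have hk0match : ∀ j < k0, s.getD j ' ' = s.getD (i + j) ' ' := by
    intro j hj
    rw [hk0] at hj
    split at hj
    · rename_i hir
      have hlr' : 1 ≤ l ∧ l < i := by
        rcases hpos with h | h
        · omega
        · exact h
      have hzil : z.getD (i - l) 0 = pvL s (i - l) := hz (i - l) (by omega) (by omega)
      have hj1 : j < pvL s (i - l) := by rw [hzil] at hj; omega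
      have hj2 : j < r - i := by omega
      have e1 : s.getD j ' ' = s.getD (i - l + j) ' ' := pvL_match s (i - l) j hj1
      have e2 : s.getD (i - l + j) ' ' = s.getD (l + (i - l + j)) ' ' := hwin (i - l + j) (by omega)
      have e3 : l + (i - l + j) = i + j := by omega
      rw [e1, e2, e3]
    · omega
  have hk : pvWhileK s s.length i k0 = pvL s i :=
    pvWhileK_eq s i (s.length - (i + k0)) k0 (le_refl _) hk0le hk0match
  have hLle : pvL s i ≤ s.length - i := pvL_le s i
  simp only [pvZStep]
  rw [← hk0, hk]
  split
  · rename_i hupd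
    dsimp only
    refine ⟨by simp [hlen], ?_, by omega, by omega, ?_, by omega⟩
    · intro m hm1 hm2
      by_cases hmi : m = i
      · subst hmi
        rw [List.getD_eq_getElem?_getD, List.getElem?_set_self (by omega)]
        simp
      · rw [List.getD_eq_getElem?_getD, List.getElem?_set_ne (by omega), ← List.getD_eq_getElem?_getD]
        exact hz m hm1 (by omega)
    · intro j hj
      exact pvL_match s i j (by omega)
  · dsimp only
    refine ⟨by simp [hlen], ?_, hlr, hrn, hwin, by omega⟩
    intro m hm1 hm2
    by_cases hmi : m = i
    · subst hmi
      rw [List.getD_eq_getElem?_getD, List.getElem?_set_self (by omega)]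
      simp
    · rw [List.getD_eq_getElem?_getD, List.getElem?_set_ne (by omega), ← List.getD_eq_getElem?_getD]
      exact hz m hm1 (by omega)

theorem pvZFold (s : List Char) :
    ∀ c i st, 1 ≤ i → i + c = s.length → pvInv s st i →
    pvInv s ((List.range' i c).foldl (pvZStep s s.length) st) s.length := by
  intro c
  induction c with
  | zero =>
    intro i st hi hc hInv
    simpa [List.range'] using (by rw [← hc]; simpa using hInv)
  | succ c ih =>
    intro i st hi hc hInv
    rw [List.range'_succ, List.foldl_cons]
    exact ih (i + 1) _ (by omega) (by omega) (pvZStep_inv s st i hi (by omega) hInv)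

theorem pvZ_correct (s : List Char) (m : Nat) (hm1 : 1 ≤ m) (hm2 : m < s.length) :
    (((List.range' 1 (s.length - 1)).foldl (pvZStep s s.length)
        (List.replicate s.length 0, 0, 0)).1).getD m 0 = pvL s m := by
  have h0 : pvInv s (List.replicate s.length 0, 0, 0) 1 := by
    simp only [pvInv]
    refine ⟨by simp, ?_, by omega, by omega, ?_, by omega⟩
    · intro m h1 h2; omega
    · intro j hj; omega
  have := pvZFold s (s.length - 1) 1 _ (by omega) (by omega) h0
  exact this.2.1 m hm1 hm2

theorem pvFoldl_congr {α β : Type} (l : List β) (f g : α → β → α) (init : α)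
    (h : ∀ acc x, x ∈ l → f acc x = g acc x) : l.foldl f init = l.foldl g init := by
  induction l generalizing init with
  | nil => rfl
  | cons a l ih =>
    rw [List.foldl_cons, List.foldl_cons, h init a (by simp)]
    exact ih _ (fun acc x hx => h acc x (by simp [hx]))

theorem pvStep_eq (s : List Char) (i : Nat) (_h1 : 1 ≤ i) (_h2 : i < s.length)
    (g : List (Int × String)) :
    (match pvInnerA s s.length i i with
      | some v => g.set i v
      | none => g)
    = (if i + pvL s i < s.length ∧
          s.getD (i + pvL s i) ' ' < s.getD (i + pvL s i - i) ' ' then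
        g.set i (((i + pvL s i : Nat) : Int), String.ofList [s.getD (i + pvL s i - i) ' '])
      else g) := by
  rw [pvInnerA_eq]
  unfold pvGain
  by_cases hc : i + pvL s i < s.length ∧ s.getD (i + pvL s i) ' ' < s.getD (i + pvL s i - i) ' '
  · simp only [if_pos hc]
  · simp only [if_neg hc]

-- ===== VERDICT (by name: the statement is the Claim_ definition above) =====
theorem get_self_insert_gain_table_spec : Claim_equal_get_self_insert_gain_table := by
  intro digit _
  unfold Spec_get_self_insert_gain_table
  unfold get_self_insert_gain_table get_self_insert_gain_table_alt
  simp only []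
  refine pvFoldl_congr _ _ _ _ ?_
  intro g i hi
  rw [List.mem_range'_1] at hi
  have h1 : 1 ≤ i := hi.1
  have h2 : i < digit.toList.length := by omega
  rw [pvZ_correct digit.toList i h1 h2]
  exact pvStep_eq digit.toList i h1 h2 g
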